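-- pv_equiv track=rewrite | github.com/ujjwall-R/Thesis-Electric-Vehicle-Routing-Problem | sharecode/sequences.py | carCapacityMaintained
-- ===== SOURCE A (Python) =====
-- def carCapacityMaintained(route):
--     curWt = 0
--     for i in range(len(route)):
--         wt = route[i][1]
--         curWt += wt
--         if curWt > 3:
--             return False
--         if curWt < 0:
--             return False
--
--     return True
-- ===== SOURCE B (Python) =====
-- def carCapacityMaintained(route):
--     # Backward scan: (lo, hi) = min/max cumulative weight over nonempty prefixes
--     # of the suffix still to be processed (Kadane-style excursion recurrence).
--     lo = hi = 0
--     for _, w in reversed(route):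
--         lo = w + min(0, lo)
--         hi = w + max(0, hi)
--     return lo >= 0 and hi <= 3
-- ===== Notes on version B (the rewrite author's own statement) =====
-- stated objective: alternative
-- what changed: Instead of A's forward running-sum loop with early exits, B scans the route backwards maintaining the minimum and maximum prefix-sum excursion of the remaining suffix via the Kadane-style recurrence lo=w+min(0,lo), hi=w+max(0,hi), and compares only those two extremes against the bounds at the end.
import Mathlib
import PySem

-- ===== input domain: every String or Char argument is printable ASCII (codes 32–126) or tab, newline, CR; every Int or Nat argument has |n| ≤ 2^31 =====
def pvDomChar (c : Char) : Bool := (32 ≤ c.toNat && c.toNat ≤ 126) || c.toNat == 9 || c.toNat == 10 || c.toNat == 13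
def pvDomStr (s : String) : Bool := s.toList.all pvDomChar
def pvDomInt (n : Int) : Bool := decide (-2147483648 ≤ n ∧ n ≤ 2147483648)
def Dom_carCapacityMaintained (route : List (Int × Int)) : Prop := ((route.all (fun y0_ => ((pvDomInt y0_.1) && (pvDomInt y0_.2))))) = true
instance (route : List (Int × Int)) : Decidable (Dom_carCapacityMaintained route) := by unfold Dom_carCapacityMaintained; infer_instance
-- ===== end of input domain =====

-- B replaces A's forward running-sum loop (early exits) by a backward scan computing the
-- min/max prefix-sum excursion of the suffix (Kadane-style), checked against the bounds once.

-- ===== PORT A =====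
-- the for-loop with early returns, carrying curWt
def carCapacityMaintainedLoop (curWt : Int) : List (Int × Int) → Bool
  | [] => true
  | (_, wt) :: rest =>
    let curWt' := curWt + wt
    if curWt' > 3 then false
    else if curWt' < 0 then false
    else carCapacityMaintainedLoop curWt' rest

def carCapacityMaintained (route : List (Int × Int)) : Bool :=
  carCapacityMaintainedLoop 0 route

-- ===== PORT B =====
-- the 'for _, w in reversed(route)' loop updating (lo, hi)
def carCapacityMaintained_alt (route : List (Int × Int)) : Bool :=
  let p := route.reverse.foldl (fun (lh : Int × Int) (q : Int × Int) =>
    (q.2 + min 0 lh.1, q.2 + max 0 lh.2)) (0, 0)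
  decide (p.1 ≥ 0) && decide (p.2 ≤ 3)

-- ===== PRECONDITION & SPEC =====
def Spec_carCapacityMaintained (route : List (Int × Int)) (out : Bool) : Prop := out = carCapacityMaintained_alt route
instance (route : List (Int × Int)) (out : Bool) : Decidable (Spec_carCapacityMaintained route out) := by unfold Spec_carCapacityMaintained; infer_instance

-- ===== CLAIM (what is proved, stated in full; the proofs are below) =====
def Claim_equal_carCapacityMaintained : Prop := ∀ (route : List (Int × Int)), Dom_carCapacityMaintained route → Spec_carCapacityMaintained route (carCapacityMaintained route)

-- ===== LEMMAS AND PROOFS =====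
-- the foldr form of B's backward loop (foldl over reverse = foldr)
def suffixExtremes : List (Int × Int) → Int × Int
  | [] => (0, 0)
  | (_, w) :: rest =>
    let p := suffixExtremes rest
    (w + min 0 p.1, w + max 0 p.2)

theorem foldr_eq_suffixExtremes (route : List (Int × Int)) :
    List.foldr (fun (q : Int × Int) (lh : Int × Int) => (q.2 + min 0 lh.1, q.2 + max 0 lh.2)) (0, 0) route
      = suffixExtremes route := by
  induction route with
  | nil => rfl
  | cons q rest ih => simp [suffixExtremes, ih]

theorem alt_eq_foldr (route : List (Int × Int)) :
    carCapacityMaintained_alt route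
      = (decide ((suffixExtremes route).1 ≥ 0) && decide ((suffixExtremes route).2 ≤ 3)) := by
  unfold carCapacityMaintained_alt
  rw [List.foldl_reverse]
  rw [foldr_eq_suffixExtremes]

theorem loop_eq_extremes (route : List (Int × Int)) : ∀ (c : Int), 0 ≤ c → c ≤ 3 →
    carCapacityMaintainedLoop c route
      = (decide (0 ≤ c + min 0 (suffixExtremes route).1)
          && decide (c + max 0 (suffixExtremes route).2 ≤ 3)) := by
  induction route with
  | nil => intro c h0 h3; simp [carCapacityMaintainedLoop, suffixExtremes]; omega
  | cons q rest ih =>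
    intro c h0 h3
    obtain ⟨_, w⟩ := q
    simp only [carCapacityMaintainedLoop, suffixExtremes]
    by_cases h1 : c + w > 3
    · simp only [if_pos h1]
      have : ¬ (c + max 0 (w + max 0 (suffixExtremes rest).2) ≤ 3) := by omega
      simp [this]
    · by_cases h2 : c + w < 0
      · simp only [if_neg h1, if_pos h2]
        have : ¬ (0 ≤ c + min 0 (w + min 0 (suffixExtremes rest).1)) := by omega
        simp [this]
      · simp only [if_neg h1, if_neg h2]
        rw [ih (c + w) (by omega) (by omega)]
        congr 1 <;> · rw [decide_eq_decide]; omega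

-- ===== VERDICT (by name: the statement is the Claim_ definition above) =====
theorem carCapacityMaintained_spec : Claim_equal_carCapacityMaintained := by
  intro route _
  unfold Spec_carCapacityMaintained carCapacityMaintained
  rw [alt_eq_foldr, loop_eq_extremes route 0 (by omega) (by omega)]
  congr 1 <;> · rw [decide_eq_decide]; omega
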